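-- pv_equiv track=rewrite | github.com/mhihasan/advent-of-code | puzzles/year_2023/day18/solution.py | find_vertices
-- ===== SOURCE A (Python) =====
-- def find_vertices(dig_plan):
--     current_row = 0
--     current_col = 0
--     vertices = []
--     directions = {"R": (0, 1), "L": (0, -1), "U": (-1, 0), "D": (1, 0)}
--     for direction, distance in dig_plan:
--         direction = directions[direction]
--
--         current_row += direction[0] * distance
--         current_col += direction[1] * distance
--         vertices.append((current_row, current_col))
--     return vertices
-- ===== SOURCE B (Python) =====
-- def _accumulate(deltas):
--     totals = []
--     running = 0
--     for d in deltas: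
--         running += d
--         totals.append(running)
--     return totals
--
--
-- def find_vertices(dig_plan):
--     directions = {"R": (0, 1), "L": (0, -1), "U": (-1, 0), "D": (1, 0)}
--     row_deltas = [directions[d][0] * n for d, n in dig_plan]
--     col_deltas = [directions[d][1] * n for d, n in dig_plan]
--     return list(zip(_accumulate(row_deltas), _accumulate(col_deltas)))
-- ===== Notes on version B (the rewrite author's own statement) =====
-- stated objective: alternative
-- what changed: Replaces the single interleaved loop carrying two running coordinates with two independent delta-map + prefix-sum passes that are zipped into the vertex list.
import Mathlib
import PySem

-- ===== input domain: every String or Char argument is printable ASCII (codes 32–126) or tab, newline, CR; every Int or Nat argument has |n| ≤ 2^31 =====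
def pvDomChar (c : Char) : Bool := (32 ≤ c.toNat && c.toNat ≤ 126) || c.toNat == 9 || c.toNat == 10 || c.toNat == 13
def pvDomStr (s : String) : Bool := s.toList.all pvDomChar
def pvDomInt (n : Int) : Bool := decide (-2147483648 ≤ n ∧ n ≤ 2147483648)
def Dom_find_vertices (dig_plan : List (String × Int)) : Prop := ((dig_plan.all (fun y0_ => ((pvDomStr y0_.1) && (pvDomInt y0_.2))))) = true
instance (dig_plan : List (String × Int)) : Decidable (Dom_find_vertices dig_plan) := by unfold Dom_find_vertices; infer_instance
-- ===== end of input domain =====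

-- B replaces A's single interleaved loop (two running coordinates) with two
-- independent delta-map + prefix-sum passes zipped into the vertex list (alternative decomposition).


-- ===== PORT A =====
-- shared helper: the 'directions' dict both Pythons index; Python raises KeyError on
-- an unknown direction (excluded by Pre_), the port returns (0, 0) there.
def fvDirections : PySem.Dict String (Int × Int) :=
  PySem.Dict.ofList [("R", ((0 : Int), (1 : Int))), ("L", (0, -1)), ("U", (-1, 0)), ("D", (1, 0))]

def fvDirGet (s : String) : Int × Int := (PySem.Dict.get? fvDirections s).getD (0, 0)

def find_vertices (dig_plan : List (String × Int)) : List (Int × Int) :=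
  let st := dig_plan.foldl
    (fun (st : Int × Int × List (Int × Int)) mv =>
      let d := fvDirGet mv.1
      let r := st.1 + d.1 * mv.2
      let c := st.2.1 + d.2 * mv.2
      (r, c, st.2.2 ++ [(r, c)]))
    (0, 0, [])
  st.2.2

-- ===== PORT B =====
-- B's _accumulate helper (running prefix sums, no injected initial 0)
def fvAccumulate (running : Int) : List Int → List Int
  | [] => []
  | d :: ds => (running + d) :: fvAccumulate (running + d) ds

def find_vertices_alt (dig_plan : List (String × Int)) : List (Int × Int) :=
  let row_deltas := dig_plan.map (fun mv => (fvDirGet mv.1).1 * mv.2)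
  let col_deltas := dig_plan.map (fun mv => (fvDirGet mv.1).2 * mv.2)
  (fvAccumulate 0 row_deltas).zip (fvAccumulate 0 col_deltas)

-- ===== PRECONDITION & SPEC =====
-- Pre_ excludes exactly the inputs where both Pythons raise KeyError: a move whose
-- direction is not one of the four dict keys "R"/"L"/"U"/"D".
def Pre_find_vertices (dig_plan : List (String × Int)) : Prop :=
  ∀ mv ∈ dig_plan, mv.1 = "R" ∨ mv.1 = "L" ∨ mv.1 = "U" ∨ mv.1 = "D"
instance (dig_plan : List (String × Int)) : Decidable (Pre_find_vertices dig_plan) := by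
  unfold Pre_find_vertices; infer_instance

def pvWitness_find_vertices : (List (String × Int)) := [("R", 3), ("D", 2), ("L", 1)]

def Spec_find_vertices (dig_plan : List (String × Int)) (out : List (Int × Int)) : Prop := out = find_vertices_alt dig_plan
instance (dig_plan : List (String × Int)) (out : List (Int × Int)) : Decidable (Spec_find_vertices dig_plan out) := by unfold Spec_find_vertices; infer_instance

-- ===== CLAIM (what is proved, stated in full; the proofs are below) =====
def Claim_equal_find_vertices : Prop := ∀ (dig_plan : List (String × Int)), Dom_find_vertices dig_plan → Pre_find_vertices dig_plan → Spec_find_vertices dig_plan (find_vertices dig_plan)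

-- ===== LEMMAS AND PROOFS =====
lemma fv_fold_eq (l : List (String × Int)) : ∀ (r c : Int) (acc : List (Int × Int)),
    (l.foldl
      (fun (st : Int × Int × List (Int × Int)) mv =>
        let d := fvDirGet mv.1
        let rr := st.1 + d.1 * mv.2
        let cc := st.2.1 + d.2 * mv.2
        (rr, cc, st.2.2 ++ [(rr, cc)]))
      (r, c, acc)).2.2
    = acc ++ (fvAccumulate r (l.map (fun mv => (fvDirGet mv.1).1 * mv.2))).zip
              (fvAccumulate c (l.map (fun mv => (fvDirGet mv.1).2 * mv.2))) := by
  induction l with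
  | nil => simp [fvAccumulate]
  | cons mv tl ih =>
    intro r c acc
    simp only [List.foldl_cons, List.map_cons, fvAccumulate, List.zip_cons_cons]
    rw [ih]
    simp

-- ===== VERDICT (by name: the statement is the Claim_ definition above) =====
theorem find_vertices_spec : Claim_equal_find_vertices := by
  intro dig_plan _ _
  unfold Spec_find_vertices find_vertices find_vertices_alt
  simpa using fv_fold_eq dig_plan 0 0 []
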